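-- pv_equiv track=rewrite | github.com/AgeeKey/Mirai | mirai-agent/core/task_planning/validation.py | _check_requirements_coverage
-- ===== SOURCE A (Python) =====
-- from typing import Any, Dict, List, Optional, Tuple
--
-- def _check_requirements_coverage(
--
--     plan: Dict,
--     requirements: List[str]
-- ) -> int:
--     """Проверяет сколько требований покрыто"""
--     covered = 0
--     task_descriptions = [
--         t.get('description', '').lower()
--         for t in plan.get('tasks', [])
--     ]
--
--     for req in requirements:
--         req_lower = req.lower()
--         if any(req_lower in desc for desc in task_descriptions):
--             covered += 1
--
--     return covered
-- ===== SOURCE B (Python) =====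
-- def _check_requirements_coverage(plan, requirements):
--     """Проверяет сколько требований покрыто"""
--     remaining = [r.lower() for r in requirements]
--     covered = 0
--     for t in plan.get('tasks', []):
--         desc = t.get('description', '').lower()
--         still = []
--         for r in remaining:
--             if r in desc:
--                 covered += 1
--             else:
--                 still.append(r)
--         remaining = still
--     return covered
-- ===== Notes on version B (the rewrite author's own statement) =====
-- stated objective: alternative
-- what changed: B is description-major with a shrinking work list: each task description is scanned once against the still-uncovered requirements, which are removed from the work list as soon as they match (so later descriptions do less work), instead of A's requirement-major loop that rescans the full description list with any() for every requirement.
import Mathlib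
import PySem

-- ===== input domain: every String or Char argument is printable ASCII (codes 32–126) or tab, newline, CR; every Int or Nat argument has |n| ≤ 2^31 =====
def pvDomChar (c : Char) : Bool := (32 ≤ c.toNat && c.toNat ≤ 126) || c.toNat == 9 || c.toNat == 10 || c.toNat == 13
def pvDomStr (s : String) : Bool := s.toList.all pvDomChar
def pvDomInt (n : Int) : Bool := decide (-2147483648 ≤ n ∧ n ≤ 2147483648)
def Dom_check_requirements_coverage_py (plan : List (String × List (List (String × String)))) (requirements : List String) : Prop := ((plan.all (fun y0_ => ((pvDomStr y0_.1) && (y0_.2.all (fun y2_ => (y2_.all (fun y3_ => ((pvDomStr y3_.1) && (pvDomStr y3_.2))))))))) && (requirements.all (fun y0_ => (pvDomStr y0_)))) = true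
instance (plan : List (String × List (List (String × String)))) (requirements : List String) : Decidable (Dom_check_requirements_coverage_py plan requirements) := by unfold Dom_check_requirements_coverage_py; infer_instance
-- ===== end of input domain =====

-- B replaces A's requirement-major loop (any() over all descriptions per requirement) by a
-- description-major pass over a shrinking work list of still-uncovered requirements; objective: alternative.
-- ===== PORT A =====
def check_requirements_coverage_py (plan : List (String × List (List (String × String)))) (requirements : List String) : Int :=
  let task_descriptions := ((PySem.Dict.mk plan).getD "tasks" []).map
      (fun t => PySem.Str.lower ((PySem.Dict.mk t).getD "description" ""))
  requirements.foldl (fun covered req =>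
    let req_lower := PySem.Str.lower req
    if task_descriptions.any (fun desc => PySem.Str.isIn req_lower desc)
    then covered + 1 else covered) 0

-- ===== PORT B =====
def check_requirements_coverage_py_alt (plan : List (String × List (List (String × String)))) (requirements : List String) : Int :=
  let st := ((PySem.Dict.mk plan).getD "tasks" []).foldl
      (fun (st : Int × List String) t =>
        let desc := PySem.Str.lower ((PySem.Dict.mk t).getD "description" "")
        st.2.foldl
          (fun (st2 : Int × List String) r =>
            if PySem.Str.isIn r desc then (st2.1 + 1, st2.2) else (st2.1, st2.2 ++ [r]))
          (st.1, []))
      (0, requirements.map PySem.Str.lower)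
  st.1

-- ===== PRECONDITION & SPEC =====
def Spec_check_requirements_coverage_py (plan : List (String × List (List (String × String)))) (requirements : List String) (out : Int) : Prop := out = check_requirements_coverage_py_alt plan requirements
instance (plan : List (String × List (List (String × String)))) (requirements : List String) (out : Int) : Decidable (Spec_check_requirements_coverage_py plan requirements out) := by unfold Spec_check_requirements_coverage_py; infer_instance

-- ===== CLAIM (what is proved, stated in full; the proofs are below) =====
def Claim_equal_check_requirements_coverage_py : Prop := ∀ (plan : List (String × List (List (String × String)))) (requirements : List String), Dom_check_requirements_coverage_py plan requirements → Spec_check_requirements_coverage_py plan requirements (check_requirements_coverage_py plan requirements)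

-- ===== LEMMAS AND PROOFS =====

-- A's counting loop is a countP.
theorem a_fold_count (l : List String) (p : String → Bool) (a : Int) :
    l.foldl (fun covered req => if p req then covered + 1 else covered) a
      = a + (l.countP p : Int) := by
  induction l generalizing a with
  | nil => simp
  | cons x l ih =>
      by_cases h : p x
      · simp [h, ih]; omega
      · simp [h, ih]

-- B's inner loop: one description splits the work list into counted hits and surviving misses.
theorem b_inner (rem : List String) (d : String) (c : Int) (s : List String) :
    rem.foldl
      (fun (st2 : Int × List String) r =>
        if PySem.Str.isIn r d then (st2.1 + 1, st2.2) else (st2.1, st2.2 ++ [r]))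
      (c, s)
    = (c + (rem.countP (fun r => PySem.Str.isIn r d) : Int),
       s ++ rem.filter (fun r => !PySem.Str.isIn r d)) := by
  induction rem generalizing c s with
  | nil => simp
  | cons r rem ih =>
      rw [List.foldl_cons]
      by_cases h : PySem.Str.isIn r d
      · have h' : PySem.Chars.isIn r.toList d.toList = true := by simpa using h
        rw [if_pos h, ih]
        simp [List.countP_cons, List.filter_cons, h', Prod.ext_iff]
        omega
      · have h' : PySem.Chars.isIn r.toList d.toList = false := by simpa using h
        rw [if_neg h, ih]
        simp [h']

-- countP of a disjunction splits over the filtered complement of the first disjunct.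
theorem countP_or_split (rem : List String) (q s : String → Bool) :
    rem.countP (fun r => q r || s r)
      = rem.countP q + (rem.filter (fun r => !q r)).countP s := by
  induction rem with
  | nil => simp
  | cons r rem ih =>
      by_cases h : q r
      · simp [List.countP_cons, h, ih]
        omega
      · simp [List.countP_cons, List.filter_cons, h, ih]
        omega

-- B's outer loop invariant: covered count grows by the requirements some remaining description hits.
theorem b_outer (D : List String) (rem : List String) (c : Int) :
    (D.foldl
      (fun (st : Int × List String) d =>
        st.2.foldl
          (fun (st2 : Int × List String) r =>
            if PySem.Str.isIn r d then (st2.1 + 1, st2.2) else (st2.1, st2.2 ++ [r]))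
          (st.1, []))
      (c, rem)).1
    = c + (rem.countP (fun r => D.any (fun d => PySem.Str.isIn r d)) : Int) := by
  induction D generalizing rem c with
  | nil => simp
  | cons d D ih =>
      rw [List.foldl_cons]
      have h1 := b_inner rem d c []
      simp only [List.nil_append] at h1
      have hsplit : rem.countP (fun r => (d :: D).any (fun d' => PySem.Str.isIn r d'))
          = rem.countP (fun r => PySem.Str.isIn r d)
            + (rem.filter (fun r => !PySem.Str.isIn r d)).countP
                (fun r => D.any (fun d' => PySem.Str.isIn r d')) := by
        simpa using countP_or_split rem (fun r => PySem.Str.isIn r d)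
          (fun r => D.any (fun d' => PySem.Str.isIn r d'))
      show (D.foldl _ (rem.foldl _ (c, [])) ).1 = _
      rw [h1, ih, hsplit]
      push_cast
      ring

-- ===== VERDICT (by name: the statement is the Claim_ definition above) =====
theorem check_requirements_coverage_py_spec : Claim_equal_check_requirements_coverage_py := by
  intro plan requirements _
  show check_requirements_coverage_py plan requirements = check_requirements_coverage_py_alt plan requirements
  unfold check_requirements_coverage_py check_requirements_coverage_py_alt
  dsimp only
  rw [a_fold_count]
  have hb := b_outer
    (((PySem.Dict.mk plan).getD "tasks" []).map
      (fun t => PySem.Str.lower ((PySem.Dict.mk t).getD "description" "")))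
    (requirements.map PySem.Str.lower) 0
  rw [List.foldl_map] at hb
  rw [hb]
  simp only [List.countP_map, List.any_map, zero_add, Int.natCast_inj]
  exact List.countP_congr (fun req _ => by simp [Function.comp])
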